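-- pv_equiv track=rewrite | github.com/monosd-prog/pump_short | scripts/debug_modules/state_checker.py | _service_status_line
-- ===== SOURCE A (Python) =====
-- def _service_status_line(service_status: str) -> str:
--     """Extract the first 'Active:' line or first non-empty line."""
--     for line in service_status.splitlines():
--         stripped = line.strip()
--         if stripped.lower().startswith("active:"):
--             return stripped
--     for line in service_status.splitlines():
--         stripped = line.strip()
--         if stripped:
--             return stripped
--     return service_status[:120] if service_status else "unknown"
-- ===== SOURCE B (Python) =====
-- def _service_status_line(service_status: str) -> str:
--     """Extract the first 'Active:' line or first non-empty line (single pass)."""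
--     first_nonempty = None
--     for line in service_status.splitlines():
--         stripped = line.strip()
--         if stripped.lower().startswith("active:"):
--             return stripped
--         if first_nonempty is None and stripped:
--             first_nonempty = stripped
--     if first_nonempty is not None:
--         return first_nonempty
--     return service_status[:120] if service_status else "unknown"
-- ===== Notes on version B (the rewrite author's own statement) =====
-- stated objective: simpler
-- what changed: Replaces A's two sequential scans over splitlines (one for an 'Active:' line, one for a non-empty line) by a single loop that returns an Active line immediately and records the first non-empty line as it goes.
import Mathlib
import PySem

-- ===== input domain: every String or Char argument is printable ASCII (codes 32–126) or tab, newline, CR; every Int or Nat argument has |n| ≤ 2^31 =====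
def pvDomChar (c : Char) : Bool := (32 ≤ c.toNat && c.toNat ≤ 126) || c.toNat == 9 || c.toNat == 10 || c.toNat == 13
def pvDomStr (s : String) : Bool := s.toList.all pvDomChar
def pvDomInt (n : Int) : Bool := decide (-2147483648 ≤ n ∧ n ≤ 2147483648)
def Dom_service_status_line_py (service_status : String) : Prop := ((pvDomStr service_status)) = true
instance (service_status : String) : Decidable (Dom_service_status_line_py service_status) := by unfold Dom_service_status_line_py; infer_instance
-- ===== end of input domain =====

-- B changes only the decomposition: one single-pass loop instead of A's two sequential scans; same values everywhere.
-- ===== PORT A =====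
-- first loop of A: return the first stripped line whose lower-case form starts with "active:"
def ssA_scan1 : List String → Option String
  | [] => none
  | l :: ls =>
      let stripped := PySem.Str.strip l
      if PySem.Str.startswith (PySem.Str.lower stripped) "active:" then some stripped
      else ssA_scan1 ls

-- second loop of A: return the first non-empty stripped line
def ssA_scan2 : List String → Option String
  | [] => none
  | l :: ls =>
      let stripped := PySem.Str.strip l
      if stripped ≠ "" then some stripped else ssA_scan2 ls

def service_status_line_py (service_status : String) : String :=
  match ssA_scan1 (PySem.Str.splitlines service_status) with
  | some r => r
  | none =>
    match ssA_scan2 (PySem.Str.splitlines service_status) with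
    | some r => r
    | none =>
      if service_status ≠ "" then PySem.Str.slice service_status none (some 120) else "unknown"

-- ===== PORT B =====
-- B's single loop, carrying first_nonempty : Option String; the original string is passed for the fallback
def ssB_loop (ls : List String) (firstNonempty : Option String) (s : String) : String :=
  match ls with
  | [] =>
    match firstNonempty with
    | some r => r
    | none => if s ≠ "" then PySem.Str.slice s none (some 120) else "unknown"
  | l :: rest =>
      let stripped := PySem.Str.strip l
      if PySem.Str.startswith (PySem.Str.lower stripped) "active:" then stripped
      else ssB_loop rest (if firstNonempty = none ∧ stripped ≠ "" then some stripped else firstNonempty) s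

def service_status_line_py_alt (service_status : String) : String :=
  ssB_loop (PySem.Str.splitlines service_status) none service_status

-- ===== PRECONDITION & SPEC =====
def Spec_service_status_line_py (service_status : String) (out : String) : Prop := out = service_status_line_py_alt service_status
instance (service_status : String) (out : String) : Decidable (Spec_service_status_line_py service_status out) := by unfold Spec_service_status_line_py; infer_instance

-- ===== CLAIM (what is proved, stated in full; the proofs are below) =====
def Claim_equal_service_status_line_py : Prop := ∀ (service_status : String), Dom_service_status_line_py service_status → Spec_service_status_line_py service_status (service_status_line_py service_status)

-- ===== LEMMAS AND PROOFS =====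
-- Loop invariant: B's loop equals A's layered result, with the accumulator taking
-- priority over scan2 of the remaining lines and the fallback.
theorem ssB_loop_eq (ls : List String) (acc : Option String) (s : String) :
    ssB_loop ls acc s =
      match ssA_scan1 ls with
      | some r => r
      | none =>
        match acc with
        | some r => r
        | none =>
          match ssA_scan2 ls with
          | some r => r
          | none => if s ≠ "" then PySem.Str.slice s none (some 120) else "unknown" := by
  induction ls generalizing acc with
  | nil => cases acc <;> simp [ssB_loop, ssA_scan1, ssA_scan2]
  | cons l rest ih =>
    simp only [ssB_loop, ssA_scan1, ssA_scan2]
    by_cases hact : PySem.Chars.startswith (PySem.Chars.lower (PySem.Chars.strip l.toList))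
        ['a', 'c', 't', 'i', 'v', 'e', ':'] = true
    · simp [hact]
    · by_cases hne : PySem.Str.strip l ≠ ""
      · cases acc <;> simp [hact, hne, ih]
      · cases acc <;> simp [hact, hne, ih]

theorem service_status_line_py_spec : Claim_equal_service_status_line_py := by
  intro s _
  show service_status_line_py s = service_status_line_py_alt s
  rw [service_status_line_py_alt, ssB_loop_eq, service_status_line_py]
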